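-- pv_equiv track=rewrite | github.com/Rayvivek881/python_django | DynamicPrograming/blockBUilding.py | minCost
-- ===== SOURCE A (Python) =====
-- def minCost(n, x, y, z):
--     dp = [0] * (n + 1)
--     for i in range(2, n + 1):
--         if i & 1:
--             dp[i] = min(dp[(i + 1) // 2] + x + z, dp[i - 1] + y)
--         else:
--             dp[i] = min(dp[i // 2] + x, dp[i - 1] + y)
--     return dp[n]
-- ===== SOURCE B (Python) =====
-- def minCost(n, x, y, z):
--     # Push-based relaxation over the outgoing edges of each node, in
--     # topological (increasing) order, instead of A's pull-based recurrence.
--     f = [None] * (n + 1)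
--     f[0] = 0
--     if n >= 1:
--         f[1] = 0
--     for i in range(1, n):
--         base = f[i]
--         for j, c in ((2 * i, x), (2 * i - 1, x + z), (i + 1, y)):
--             if 2 <= j <= n and (f[j] is None or base + c < f[j]):
--                 f[j] = base + c
--     return f[n]
-- ===== Notes on version B (the rewrite author's own statement) =====
-- stated objective: alternative
-- what changed: A pulls each dp[i] from its two predecessors via a parity branch and ceil-halving index; B instead push-relaxes the outgoing edges i->2i (cost x), i->2i-1 (cost x+z), i->i+1 (cost y) of each node in topological order over a None-initialised table, Bellman-style.
import Mathlib
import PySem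

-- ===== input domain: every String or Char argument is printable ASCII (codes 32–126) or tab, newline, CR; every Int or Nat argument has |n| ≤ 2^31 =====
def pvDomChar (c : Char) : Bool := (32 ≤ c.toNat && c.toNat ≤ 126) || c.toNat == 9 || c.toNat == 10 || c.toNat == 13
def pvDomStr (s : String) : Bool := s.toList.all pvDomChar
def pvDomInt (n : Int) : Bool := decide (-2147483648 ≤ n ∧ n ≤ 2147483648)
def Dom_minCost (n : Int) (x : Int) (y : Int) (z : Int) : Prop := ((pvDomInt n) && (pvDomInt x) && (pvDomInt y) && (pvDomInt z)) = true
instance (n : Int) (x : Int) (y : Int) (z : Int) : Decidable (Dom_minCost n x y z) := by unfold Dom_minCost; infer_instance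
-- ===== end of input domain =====

-- B replaces A's pull-based recurrence by a push-based edge relaxation in topological order (objective: alternative, same O(n)).

-- ===== PORT A =====
-- the loop body of A; `i & 1` is ported as `i % 2 = 1` (exact: every i drawn from range(2, n+1) is nonnegative)
def stepA (x y z : Int) (dp : List Int) (i : Int) : List Int :=
  if PySem.Int.mod i 2 = 1 then
    PySem.List.pySetD dp i (min (PySem.List.pyGetD dp (PySem.Int.floordiv (i + 1) 2) 0 + x + z) (PySem.List.pyGetD dp (i - 1) 0 + y))
  else
    PySem.List.pySetD dp i (min (PySem.List.pyGetD dp (PySem.Int.floordiv i 2) 0 + x) (PySem.List.pyGetD dp (i - 1) 0 + y))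

-- all dp reads/writes are in range on the admitted inputs (0 ≤ n), so the total pyGetD/pySetD forms are exact;
-- the final dp[n] read raises in Python iff n < 0, which Pre_minCost excludes
def minCost (n : Int) (x : Int) (y : Int) (z : Int) : Int :=
  let dp : List Int := List.replicate (n + 1).toNat 0
  let dp := (PySem.List.pyRange 2 (n + 1) 1).foldl (stepA x y z) dp
  PySem.List.pyGetD dp n 0

-- ===== PORT B =====
-- one relaxation `if 2 <= j <= n and (f[j] is None or v < f[j]): f[j] = v` (v = base + c precomputed)
def relaxB (nn : Int) (v : Int) (f : List (Option Int)) (j : Int) : List (Option Int) :=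
  if 2 ≤ j ∧ j ≤ nn then
    match PySem.List.pyGetD f j none with
    | none => PySem.List.pySetD f j (some v)
    | some w => if v < w then PySem.List.pySetD f j (some v) else f
  else f

-- the loop body of B; `base = f[i]` is always an int in Python on the admitted inputs, ported as `.getD 0`
def stepB (nn x y z : Int) (f : List (Option Int)) (i : Int) : List (Option Int) :=
  let base := (PySem.List.pyGetD f i none).getD 0
  relaxB nn (base + y) (relaxB nn (base + x + z) (relaxB nn (base + x) f (2 * i)) (2 * i - 1)) (i + 1)

def minCost_alt (n : Int) (x : Int) (y : Int) (z : Int) : Int :=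
  let f : List (Option Int) := List.replicate (n + 1).toNat (none : Option Int)
  let f := PySem.List.pySetD f 0 (some 0)
  let f := if 1 ≤ n then PySem.List.pySetD f 1 (some 0) else f
  let f := (PySem.List.pyRange 1 n 1).foldl (stepB n x y z) f
  ((PySem.List.pyGetD f n none).getD 0)

-- ===== PRECONDITION & SPEC =====
-- A raises IndexError (dp[n] on a too-short list) exactly when n < 0; B raises there too (f[0] = 0 on an empty list)
def Pre_minCost (n : Int) (x : Int) (y : Int) (z : Int) : Prop := 0 ≤ n
instance (n : Int) (x : Int) (y : Int) (z : Int) : Decidable (Pre_minCost n x y z) := by unfold Pre_minCost; infer_instance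
def pvWitness_minCost : Int × Int × Int × Int := (5, 3, 4, 1)

def Spec_minCost (n : Int) (x : Int) (y : Int) (z : Int) (out : Int) : Prop := out = minCost_alt n x y z
instance (n : Int) (x : Int) (y : Int) (z : Int) (out : Int) : Decidable (Spec_minCost n x y z out) := by unfold Spec_minCost; infer_instance

-- ===== CLAIM (what is proved, stated in full; the proofs are below) =====
def Claim_equal_minCost : Prop := ∀ (n : Int) (x : Int) (y : Int) (z : Int), Dom_minCost n x y z → Pre_minCost n x y z → Spec_minCost n x y z (minCost n x y z)

-- ===== LEMMAS AND PROOFS =====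

-- the common mathematical recurrence both programs compute
def dpS (x y z : Int) : Nat → Int
  | 0 => 0
  | 1 => 0
  | (k + 2) =>
    if (k + 2) % 2 = 1 then
      min (dpS x y z ((k + 3) / 2) + x + z) (dpS x y z (k + 1) + y)
    else
      min (dpS x y z ((k + 2) / 2) + x) (dpS x y z (k + 1) + y)
  decreasing_by all_goals omega

theorem dpS_succ (x y z : Int) (k : Nat) (hk : 2 ≤ k) :
    dpS x y z k = min (dpS x y z ((k + 1) / 2) + x + (if k % 2 = 1 then z else 0)) (dpS x y z (k - 1) + y) := by
  obtain ⟨m, rfl⟩ : ∃ m, k = m + 2 := ⟨k - 2, by omega⟩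
  rw [dpS]
  by_cases h : (m + 2) % 2 = 1
  · simp only [h, if_pos]
    have : (m + 3) / 2 = (m + 2 + 1) / 2 := by omega
    rw [this]
    norm_num
  · simp only [h, if_false]
    have : (m + 2) / 2 = (m + 2 + 1) / 2 := by omega
    rw [this]
    norm_num

-- dpS equations for the two small cases
theorem dpS_zero (x y z : Int) : dpS x y z 0 = 0 := by simp [dpS]
theorem dpS_one (x y z : Int) : dpS x y z 1 = 0 := by simp [dpS]

-- getD-after-set helpers
theorem getD_set_self {a : Type} (l : List a) (n : Nat) (v d : a) (h : n < l.length) :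
    (l.set n v).getD n d = v := by
  rw [List.getD_eq_getElem?_getD, List.getElem?_set_self h]; rfl

theorem getD_set_ne {a : Type} (l : List a) (n k : Nat) (v d : a) (h : k ≠ n) :
    (l.set n v).getD k d = l.getD k d := by
  rw [List.getD_eq_getElem?_getD, List.getElem?_set_ne (by omega), ← List.getD_eq_getElem?_getD]

-- ---- relaxB characterisation ----
theorem relaxB_length (nn v : Int) (f : List (Option Int)) (j : Int) :
    (relaxB nn v f j).length = f.length := by
  unfold relaxB
  by_cases hj : 2 ≤ j ∧ j ≤ nn
  · simp only [hj, and_true, if_true]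
    cases hg : PySem.List.pyGetD f j none with
    | none => simp [PySem.List.length_pySetD]
    | some w => by_cases hv : v < w <;> simp [hv, PySem.List.length_pySetD]
  · simp [hj]

theorem setD_getD_ne (f : List (Option Int)) (j : Int) (k : Nat) (v : Option Int)
    (hj0 : (0 : Int) ≤ j) (h : (k : Int) ≠ j) :
    (PySem.List.pySetD f j v).getD k none = f.getD k none := by
  rw [PySem.List.pySetD_of_nonneg f v hj0, getD_set_ne _ _ _ _ _ (by omega)]

theorem relaxB_getD_ne (nn v : Int) (f : List (Option Int)) (j : Int) (k : Nat)
    (h : (k : Int) ≠ j) : (relaxB nn v f j).getD k none = f.getD k none := by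
  unfold relaxB
  by_cases hj : 2 ≤ j ∧ j ≤ nn
  · simp only [hj, and_true, if_true]
    have hj0 : (0 : Int) ≤ j := by omega
    cases hg : PySem.List.pyGetD f j none with
    | none => exact setD_getD_ne f j k _ hj0 h
    | some w =>
      show (if v < w then PySem.List.pySetD f j (some v) else f).getD k none = f.getD k none
      by_cases hv : v < w
      · rw [if_pos hv]; exact setD_getD_ne f j k _ hj0 h
      · rw [if_neg hv]
  · simp [hj]

theorem relaxB_getD_self (nn v : Int) (f : List (Option Int)) (j : Nat)
    (h2 : 2 ≤ j) (hn : (j : Int) ≤ nn) (hlen : j < f.length) :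
    (relaxB nn v f (j : Int)).getD j none =
      some (match f.getD j none with | none => v | some w => min v w) := by
  unfold relaxB
  have hj : (2 : Int) ≤ (j : Int) ∧ (j : Int) ≤ nn := ⟨by exact_mod_cast h2, hn⟩
  rw [if_pos hj, PySem.List.pyGetD_natCast]
  cases hg : f.getD j none with
  | none =>
    exact (by rw [PySem.List.pySetD_natCast, getD_set_self _ _ _ _ hlen] :
      (PySem.List.pySetD f (j : Int) (some v)).getD j none = some v)
  | some w =>
    show (if v < w then PySem.List.pySetD f ((j : Nat) : Int) (some v) else f).getD j none
        = some (min v w)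
    by_cases hv : v < w
    · rw [if_pos hv]
      have : (PySem.List.pySetD f ((j : Nat) : Int) (some v)).getD j none = some v := by
        rw [PySem.List.pySetD_natCast, getD_set_self _ _ _ _ hlen]
      rw [this]; congr 1; omega
    · rw [if_neg hv, hg]
      congr 1; omega

-- ---- the invariant of B's relaxation loop ----
theorem relaxB_out (nn v : Int) (f : List (Option Int)) (j : Int)
    (h : ¬ (2 ≤ j ∧ j ≤ nn)) : relaxB nn v f j = f := by
  unfold relaxB; rw [if_neg h]

def QB (x y z : Int) (N t : Nat) (F : List (Option Int)) : Prop :=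
  F.length = N + 1 ∧
  (∀ j : Nat, j ≤ N → j ≤ t + 1 → F.getD j none = some (dpS x y z j)) ∧
  (∀ j : Nat, j ≤ N → t + 1 < j →
    F.getD j none =
      if (j + 1) / 2 ≤ t then
        some (dpS x y z ((j + 1) / 2) + x + (if j % 2 = 1 then z else 0))
      else none)

theorem stepB_inv (x y z : Int) (N i : Nat) (F : List (Option Int))
    (h1 : 1 ≤ i) (h2 : i < N) (hQ : QB x y z N (i - 1) F) :
    QB x y z N i (stepB (N : Int) x y z F (i : Int)) := by
  obtain ⟨hlen, hdone, hfront⟩ := hQ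
  have hbase : (PySem.List.pyGetD F (i : Int) none).getD 0 = dpS x y z i := by
    rw [PySem.List.pyGetD_natCast, hdone i (by omega) (by omega)]; rfl
  have hc1 : (2 * (i : Int)) = ((2 * i : Nat) : Int) := by push_cast; ring
  have hc2 : (((2 * i : Nat) : Int) - 1) = ((2 * i - 1 : Nat) : Int) := by omega
  have hc3 : ((i : Int) + 1) = ((i + 1 : Nat) : Int) := by push_cast; ring
  have hstep : stepB (N : Int) x y z F (i : Int) =
      relaxB (N : Int) (dpS x y z i + y)
        (relaxB (N : Int) (dpS x y z i + x + z)
          (relaxB (N : Int) (dpS x y z i + x) F ((2 * i : Nat) : Int)) ((2 * i - 1 : Nat) : Int))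
        ((i + 1 : Nat) : Int) := by
    simp only [stepB, hbase, hc1, hc2, hc3]
  rw [hstep]
  set F1 := relaxB (N : Int) (dpS x y z i + x) F ((2 * i : Nat) : Int) with hF1
  set F2 := relaxB (N : Int) (dpS x y z i + x + z) F1 ((2 * i - 1 : Nat) : Int) with hF2
  have hlen1 : F1.length = N + 1 := by rw [hF1, relaxB_length, hlen]
  have hlen2 : F2.length = N + 1 := by rw [hF2, relaxB_length, hlen1]
  have hlen3 : (relaxB (N : Int) (dpS x y z i + y) F2 ((i + 1 : Nat) : Int)).length = N + 1 := by
    rw [relaxB_length, hlen2]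
  have hF1_2i : 2 * i ≤ N → F1.getD (2 * i) none = some (dpS x y z i + x) := by
    intro hle
    rw [hF1, relaxB_getD_self _ _ _ _ (by omega) (by exact_mod_cast hle) (by omega)]
    rw [hfront (2 * i) hle (by omega)]
    have hno : ¬ ((2 * i + 1) / 2 ≤ i - 1) := by omega
    rw [if_neg hno]
  have hF1_ne : ∀ k : Nat, k ≠ 2 * i → F1.getD k none = F.getD k none := by
    intro k hk; rw [hF1, relaxB_getD_ne _ _ _ _ _ (by exact_mod_cast hk)]
  have hF2_2i1 : 2 ≤ i → 2 * i - 1 ≤ N → F2.getD (2 * i - 1) none = some (dpS x y z i + x + z) := by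
    intro hi hle
    rw [hF2, relaxB_getD_self _ _ _ _ (by omega) (by exact_mod_cast hle) (by omega)]
    rw [hF1_ne _ (by omega), hfront (2 * i - 1) hle (by omega)]
    have hno : ¬ ((2 * i - 1 + 1) / 2 ≤ i - 1) := by omega
    rw [if_neg hno]
  have hF2_ne : ∀ k : Nat, (2 ≤ i → k ≠ 2 * i - 1) → F2.getD k none = F1.getD k none := by
    intro k hk
    rcases Nat.lt_or_ge i 2 with hi2 | hi2
    · rw [hF2, relaxB_out _ _ _ _ (by omega)]
    · rw [hF2, relaxB_getD_ne _ _ _ _ _ (by exact_mod_cast hk hi2)]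
  refine ⟨hlen3, ?_, ?_⟩
  · -- settled entries j ≤ i + 1
    intro j hjN hji
    by_cases hje : j = i + 1
    · subst hje
      rw [relaxB_getD_self _ _ _ _ (by omega) (by exact_mod_cast hjN) (by omega)]
      rcases Nat.lt_or_ge i 3 with hi3 | hi3
      · interval_cases i
        · -- i = 1 : relax target i+1 = 2 coincides with 2*i
          have hq : F2.getD 2 none = some (dpS x y z 1 + x) := by
            rw [hF2_ne 2 (by omega)]; exact hF1_2i (by omega)
          rw [hq]
          show some (min (dpS x y z 1 + y) (dpS x y z 1 + x)) = some (dpS x y z (1 + 1))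
          have hdp := dpS_succ x y z 2 (by omega)
          rw [show ((2 + 1) / 2 : Nat) = 1 from rfl] at hdp
          rw [if_neg (by omega : ¬ (2 % 2 = 1))] at hdp
          rw [show ((1 + 1 : Nat)) = 2 from rfl, min_comm]
          rw [hdp, add_zero]
        · -- i = 2 : relax target i+1 = 3 coincides with 2*i-1
          have hq : F2.getD 3 none = some (dpS x y z 2 + x + z) := by
            rw [show (3 : Nat) = 2 * 2 - 1 from rfl]; exact hF2_2i1 (by omega) (by omega)
          rw [hq]
          show some (min (dpS x y z 2 + y) (dpS x y z 2 + x + z)) = some (dpS x y z (2 + 1))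
          have hdp := dpS_succ x y z 3 (by omega)
          rw [show ((3 + 1) / 2 : Nat) = 2 from rfl] at hdp
          rw [if_pos (by omega : (3 % 2 : Nat) = 1)] at hdp
          rw [show ((2 + 1 : Nat)) = 3 from rfl, min_comm, hdp]
      · -- i ≥ 3 : f[i+1] untouched by this step's halving relaxes
        have hq : F2.getD (i + 1) none = F.getD (i + 1) none := by
          rw [hF2_ne _ (by omega), hF1_ne _ (by omega)]
        rw [hq, hfront (i + 1) hjN (by omega)]
        rw [if_pos (by omega : (i + 1 + 1) / 2 ≤ i - 1)]
        show some (min (dpS x y z i + y)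
            (dpS x y z ((i + 1 + 1) / 2) + x + if (i + 1) % 2 = 1 then z else 0)) =
          some (dpS x y z (i + 1))
        have hdp := dpS_succ x y z (i + 1) (by omega)
        rw [show (i + 1 - 1 : Nat) = i from rfl] at hdp
        rw [min_comm, hdp]
    · -- j ≤ i : untouched
      have hji' : j ≤ i := by omega
      rw [relaxB_getD_ne _ _ _ _ _ (by exact_mod_cast (by omega : j ≠ i + 1))]
      rw [hF2_ne _ (by omega), hF1_ne _ (by omega)]
      exact hdone j hjN (by omega)
  · -- frontier entries j > i + 1
    intro j hjN hji
    rw [relaxB_getD_ne _ _ _ _ _ (by exact_mod_cast (by omega : j ≠ i + 1))]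
    by_cases hj2i : j = 2 * i
    · subst hj2i
      rw [hF2_ne _ (by omega), hF1_2i hjN]
      rw [if_pos (by omega : (2 * i + 1) / 2 ≤ i)]
      rw [show ((2 * i + 1) / 2 : Nat) = i by omega]
      rw [if_neg (by omega : ¬ ((2 * i) % 2 = 1)), add_zero]
    · by_cases hj2i1 : j = 2 * i - 1
      · subst hj2i1
        rw [hF2_2i1 (by omega) hjN]
        rw [if_pos (by omega : (2 * i - 1 + 1) / 2 ≤ i)]
        rw [show ((2 * i - 1 + 1) / 2 : Nat) = i by omega]
        rw [if_pos (by omega : (2 * i - 1) % 2 = 1)]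
      · rw [hF2_ne _ (fun _ => hj2i1), hF1_ne _ hj2i, hfront j hjN (by omega)]
        by_cases hc : (j + 1) / 2 ≤ i
        · rw [if_pos (by omega : (j + 1) / 2 ≤ i - 1), if_pos hc]
        · rw [if_neg (by omega : ¬ ((j + 1) / 2 ≤ i - 1)), if_neg hc]

-- folding B's loop keeps the invariant
theorem foldB_inv (x y z : Int) (N : Nat) (hN : 1 ≤ N) (t : Nat) (ht : t + 1 ≤ N) :
    QB x y z N t ((PySem.List.pyRange 1 ((t + 1 : Nat) : Int) 1).foldl (stepB (N : Int) x y z)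
      (PySem.List.pySetD (PySem.List.pySetD (List.replicate (N + 1) (none : Option Int)) 0 (some 0)) 1 (some 0))) := by
  induction t with
  | zero =>
    rw [show (((0 + 1 : Nat) : Int)) = 1 by norm_num, PySem.List.pyRange_one_eq_nil (by norm_num)]
    simp only [List.foldl_nil]
    rw [show (0 : Int) = ((0 : Nat) : Int) from rfl, show (1 : Int) = ((1 : Nat) : Int) from rfl]
    simp only [PySem.List.pySetD_natCast]
    refine ⟨by simp, ?_, ?_⟩
    · intro j hjN hj1
      interval_cases j
      · rw [getD_set_ne _ _ _ _ _ (by omega), getD_set_self _ _ _ _ (by simp)]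
        rw [dpS_zero]; norm_num
      · rw [getD_set_self _ _ _ _ (by simp; omega)]
        rw [dpS_one]; norm_num
    · intro j hjN hj
      rw [getD_set_ne _ _ _ _ _ (by omega), getD_set_ne _ _ _ _ _ (by omega)]
      rw [if_neg (by omega : ¬ ((j + 1) / 2 ≤ 0))]
      rw [List.getD_eq_getElem?_getD, List.getElem?_replicate]
      rw [if_pos (by omega : j < N + 1)]
      rfl
  | succ t ih =>
    have hsplit : ((t + 1 + 1 : Nat) : Int) = ((t + 1 : Nat) : Int) + 1 := by push_cast; ring
    rw [hsplit, PySem.List.pyRange_one_succ_right (by exact_mod_cast Nat.le_add_left 1 t), List.foldl_append]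
    simp only [List.foldl_cons, List.foldl_nil]
    have hres := stepB_inv x y z N (t + 1) _ (by omega) (by omega) (by simpa using ih (by omega))
    simpa using hres

-- B computes dpS
theorem minCost_alt_eq (n x y z : Int) (hn : 0 ≤ n) :
    minCost_alt n x y z = dpS x y z n.toNat := by
  obtain ⟨N, rfl⟩ : ∃ N : Nat, n = (N : Int) := ⟨n.toNat, (Int.toNat_of_nonneg hn).symm⟩
  rcases Nat.eq_zero_or_pos N with hN | hN
  · subst hN
    rw [show ((0 : Nat) : Int).toNat = 0 from rfl, dpS_zero]
    rfl
  · have hT : (((N : Int)) + 1).toNat = N + 1 := by omega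
    have h1 : (1 : Int) ≤ (N : Int) := by exact_mod_cast hN
    simp only [minCost_alt]
    rw [hT, if_pos h1]
    obtain ⟨_, hdone, _⟩ := foldB_inv x y z N hN (N - 1) (by omega)
    rw [show ((N - 1 + 1 : Nat) : Int) = (N : Int) by omega] at hdone
    rw [PySem.List.pyGetD_natCast]
    rw [show (N : Int).toNat = N from by omega]
    rw [hdone N (by omega) (by omega)]
    rfl

-- ---- A's bottom-up loop computes dpS ----
theorem foldA_inv (x y z : Int) (N m : Nat) (h1 : 1 ≤ m) (h2 : m ≤ N) :
    ((PySem.List.pyRange 2 ((m : Int) + 1) 1).foldl (stepA x y z)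
        (List.replicate (N + 1) (0 : Int))).length = N + 1 ∧
    ∀ k : Nat, k ≤ m →
      ((PySem.List.pyRange 2 ((m : Int) + 1) 1).foldl (stepA x y z)
        (List.replicate (N + 1) (0 : Int))).getD k 0 = dpS x y z k := by
  induction m with
  | zero => omega
  | succ m ih =>
    rcases Nat.eq_zero_or_pos m with hm | hm
    · subst hm
      rw [show (((1 : Nat) : Int) + 1) = 2 by norm_num, PySem.List.pyRange_one_eq_nil (by norm_num)]
      simp only [List.foldl_nil]
      refine ⟨by simp, ?_⟩
      intro k hk
      rw [List.getD_eq_getElem?_getD, List.getElem?_replicate, if_pos (by omega : k < N + 1)]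
      interval_cases k
      · rw [dpS_zero]; rfl
      · rw [dpS_one]; rfl
    · obtain ⟨hlenL, hL⟩ := ih (by omega) (by omega)
      set L := (PySem.List.pyRange 2 ((m : Int) + 1) 1).foldl (stepA x y z)
        (List.replicate (N + 1) (0 : Int)) with hLdef
      have hsplit : (((m + 1 : Nat) : Int) + 1) = ((m : Int) + 1) + 1 := by push_cast; ring
      rw [hsplit, PySem.List.pyRange_one_succ_right (by omega : (2 : Int) ≤ (m : Int) + 1), List.foldl_append]
      simp only [List.foldl_cons, List.foldl_nil]
      rw [← hLdef]
      have hcast : ((m : Int) + 1) = ((m + 1 : Nat) : Int) := by push_cast; ring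
      rw [hcast]
      -- unfold one stepA at i = m+1
      have hfd1 : PySem.Int.floordiv (((m + 1 : Nat) : Int) + 1) 2 = ((m + 2) / 2 : Nat) := by
        rw [show (((m + 1 : Nat) : Int) + 1) = ((m + 2 : Nat) : Int) by push_cast; ring,
          show (2 : Int) = ((2 : Nat) : Int) from rfl, PySem.Int.floordiv_natCast]
      have hfd2 : PySem.Int.floordiv ((m + 1 : Nat) : Int) 2 = ((m + 1) / 2 : Nat) := by
        rw [show (2 : Int) = ((2 : Nat) : Int) from rfl, PySem.Int.floordiv_natCast]
      have hsub : (((m + 1 : Nat) : Int) - 1) = ((m : Nat) : Int) := by push_cast; ring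
      have hmod : PySem.Int.mod ((m + 1 : Nat) : Int) 2 = (((m + 1) % 2 : Nat) : Int) := by
        rw [show (2 : Int) = ((2 : Nat) : Int) from rfl, PySem.Int.mod_natCast]
      have hdp := dpS_succ x y z (m + 1) (by omega)
      rw [show (m + 1 - 1 : Nat) = m from rfl] at hdp
      have hget1 : PySem.List.pyGetD L (((m + 2) / 2 : Nat) : Int) 0 = dpS x y z ((m + 2) / 2) := by
        rw [PySem.List.pyGetD_natCast]; exact hL _ (by omega)
      have hget2 : PySem.List.pyGetD L (((m : Nat) : Int)) 0 = dpS x y z m := by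
        rw [PySem.List.pyGetD_natCast]; exact hL _ (by omega)
      have hget3 : PySem.List.pyGetD L (((m + 1) / 2 : Nat) : Int) 0 = dpS x y z ((m + 1) / 2) := by
        rw [PySem.List.pyGetD_natCast]; exact hL _ (by omega)
      have hstepA : stepA x y z L ((m + 1 : Nat) : Int) =
          PySem.List.pySetD L ((m + 1 : Nat) : Int) (dpS x y z (m + 1)) := by
        unfold stepA
        rw [hmod]
        by_cases hp : (m + 1) % 2 = 1
        · rw [if_pos (by exact_mod_cast hp)]
          rw [hfd1, hsub, hget1, hget2]
          congr 1
          rw [hdp, if_pos hp, show (m + 1 + 1 : Nat) = m + 2 from rfl]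
        · rw [if_neg (by exact_mod_cast hp)]
          rw [hfd2, hsub, hget3, hget2]
          congr 1
          rw [hdp, if_neg hp, add_zero, show ((m + 1 + 1) / 2 : Nat) = (m + 1) / 2 by omega]
      rw [hstepA, PySem.List.pySetD_natCast]
      refine ⟨by simp [hlenL], ?_⟩
      intro k hk
      by_cases hke : k = m + 1
      · subst hke; rw [getD_set_self _ _ _ _ (by omega)]
      · rw [getD_set_ne _ _ _ _ _ hke]; exact hL _ (by omega)

-- A computes dpS
theorem minCost_eq (n x y z : Int) (hn : 0 ≤ n) :
    minCost n x y z = dpS x y z n.toNat := by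
  obtain ⟨N, rfl⟩ : ∃ N : Nat, n = (N : Int) := ⟨n.toNat, (Int.toNat_of_nonneg hn).symm⟩
  rcases Nat.eq_zero_or_pos N with hN | hN
  · subst hN
    rw [show ((0 : Nat) : Int).toNat = 0 from rfl, dpS_zero]
    rfl
  · have hT : (((N : Int)) + 1).toNat = N + 1 := by omega
    simp only [minCost]
    rw [hT]
    obtain ⟨_, hL⟩ := foldA_inv x y z N N hN le_rfl
    rw [PySem.List.pyGetD_natCast]
    rw [show (N : Int).toNat = N from by omega]
    exact hL N le_rfl

-- ===== VERDICT =====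
theorem minCost_spec : Claim_equal_minCost := by
  intro n x y z hdom hpre
  unfold Spec_minCost
  have hn : 0 ≤ n := hpre
  rw [minCost_eq n x y z hn, minCost_alt_eq n x y z hn]
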